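-- pv_equiv track=rewrite | github.com/Terminated27/ECE522-Lab1 | lab1_files/lab1_src_Chin_Saville.py | convert_dimac
-- ===== SOURCE A (Python) =====
-- def convert_dimac(operations):
--     args = []
--     for operation, variables in operations:
--         if operation == "and":
--             args.append(f"{variables[1]} -{variables[0]} 0")
--             args.append(f"{variables[2]} -{variables[0]} 0")
--             args.append(f"-{variables[1]} -{variables[2]} {variables[0]} 0")
--         if operation == 'not':
--             args.append(f"{variables[1]} {variables[0]} 0")
--             args.append(f"-{variables[1]} -{variables[0]} 0")
--         if operation == 'buffer':
--             args.append(f"-{variables[1]} {variables[0]} 0")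
--             args.append(f"{variables[1]} -{variables[0]} 0")
--     return '\n'.join(args)
-- ===== SOURCE B (Python) =====
-- # Clauses are data: lists of (polarity, variable-index) literals per operation,
-- # rendered by one generic renderer; the operation list is consumed by recursion.
-- TEMPLATES = {
--     "and":    [[(True, 1), (False, 0)],
--                [(True, 2), (False, 0)],
--                [(False, 1), (False, 2), (True, 0)]],
--     "not":    [[(True, 1), (True, 0)],
--                [(False, 1), (False, 0)]],
--     "buffer": [[(False, 1), (True, 0)],
--                [(True, 1), (False, 0)]],
-- }
--
-- def _render(variables, clause):
--     return ' '.join(('' if pos else '-') + variables[i] for pos, i in clause) + ' 0'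
--
-- def convert_dimac(operations):
--     def go(ops):
--         if not ops:
--             return []
--         op, vs = ops[0]
--         return [_render(vs, c) for c in TEMPLATES.get(op, [])] + go(ops[1:])
--     return '\n'.join(go(operations))
-- ===== Notes on version B (the rewrite author's own statement) =====
-- stated objective: alternative
-- what changed: B represents each operation's clauses as literal-level data (lists of (polarity, variable-index) pairs) rendered by one generic joiner, and consumes the operation list by recursion, instead of A's per-operation if-chain of hard-coded f-strings appended to a mutable accumulator.
import Mathlib
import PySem

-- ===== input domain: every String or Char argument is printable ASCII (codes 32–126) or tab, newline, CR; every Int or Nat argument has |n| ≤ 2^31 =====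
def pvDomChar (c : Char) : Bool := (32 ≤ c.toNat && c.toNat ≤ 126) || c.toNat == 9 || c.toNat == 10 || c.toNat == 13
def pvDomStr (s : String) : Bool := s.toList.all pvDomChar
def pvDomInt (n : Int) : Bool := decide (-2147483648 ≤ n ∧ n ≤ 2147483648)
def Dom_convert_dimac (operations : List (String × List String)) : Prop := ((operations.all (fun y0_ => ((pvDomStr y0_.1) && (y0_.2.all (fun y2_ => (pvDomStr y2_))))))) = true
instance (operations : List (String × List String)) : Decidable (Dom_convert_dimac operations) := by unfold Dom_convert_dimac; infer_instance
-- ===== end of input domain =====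

-- B trades A's if-chain of hard-coded f-strings for literal-level clause templates
-- ((polarity, index) pairs) rendered by a generic joiner, with recursion over the input.

-- vars_[i]: exact under Pre_ (index in range); Python raises IndexError outside Pre_
def pvIdx (vs : List String) (n : Nat) : String := (PySem.List.pyGet? vs (n : Int)).getD ""

-- ===== PORT A =====
def convert_dimac (operations : List (String × List String)) : String :=
  let args : List String := operations.foldl (fun args p =>
    let operation := p.1
    let vars_ := p.2
    let args := if operation == "and" then
        args ++ [pvIdx vars_ 1 ++ " -" ++ pvIdx vars_ 0 ++ " 0",
                 pvIdx vars_ 2 ++ " -" ++ pvIdx vars_ 0 ++ " 0",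
                 "-" ++ pvIdx vars_ 1 ++ " -" ++ pvIdx vars_ 2 ++ " " ++ pvIdx vars_ 0 ++ " 0"]
      else args
    let args := if operation == "not" then
        args ++ [pvIdx vars_ 1 ++ " " ++ pvIdx vars_ 0 ++ " 0",
                 "-" ++ pvIdx vars_ 1 ++ " -" ++ pvIdx vars_ 0 ++ " 0"]
      else args
    let args := if operation == "buffer" then
        args ++ ["-" ++ pvIdx vars_ 1 ++ " " ++ pvIdx vars_ 0 ++ " 0",
                 pvIdx vars_ 1 ++ " -" ++ pvIdx vars_ 0 ++ " 0"]
      else args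
    args) []
  PySem.Str.join "\n" args

-- ===== PORT B =====
-- TEMPLATES: clauses as lists of (polarity, variable-index) literals
def pvTemplates : PySem.Dict String (List (List (Bool × Nat))) :=
  PySem.Dict.mk
    [("and",    [[(true, 1), (false, 0)],
                 [(true, 2), (false, 0)],
                 [(false, 1), (false, 2), (true, 0)]]),
     ("not",    [[(true, 1), (true, 0)],
                 [(false, 1), (false, 0)]]),
     ("buffer", [[(false, 1), (true, 0)],
                 [(true, 1), (false, 0)]])]

def pvRender (vs : List String) (clause : List (Bool × Nat)) : String :=
  PySem.Str.join " " (clause.map (fun l => (if l.1 then "" else "-") ++ pvIdx vs l.2)) ++ " 0"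

def pvGo (ops : List (String × List String)) : List String :=
  match ops with
  | [] => []
  | (op, vs) :: rest =>
      ((PySem.Dict.getD pvTemplates op []).map (fun c => pvRender vs c)) ++ pvGo rest

def convert_dimac_alt (operations : List (String × List String)) : String :=
  PySem.Str.join "\n" (pvGo operations)

-- ===== PRECONDITION & SPEC =====
-- Pre_ excludes exactly the inputs where Python A raises IndexError: a recognised
-- operation whose vars_ list is too short for the clause template it fills in.
def Pre_convert_dimac (operations : List (String × List String)) : Prop :=
  ∀ p ∈ operations,
    (p.1 = "and" → 3 ≤ p.2.length) ∧
    ((p.1 = "not" ∨ p.1 = "buffer") → 2 ≤ p.2.length)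
instance (operations : List (String × List String)) : Decidable (Pre_convert_dimac operations) := by unfold Pre_convert_dimac; infer_instance

def pvWitness_convert_dimac : (List (String × List String)) :=
  [("and", ["1", "2", "3"]), ("not", ["4", "2"]), ("xor", []), ("buffer", ["5", "4"])]

def Spec_convert_dimac (operations : List (String × List String)) (out : String) : Prop := out = convert_dimac_alt operations
instance (operations : List (String × List String)) (out : String) : Decidable (Spec_convert_dimac operations out) := by unfold Spec_convert_dimac; infer_instance

-- ===== CLAIM (what is proved, stated in full; the proofs are below) =====
def Claim_equal_convert_dimac : Prop := ∀ (operations : List (String × List String)), Dom_convert_dimac operations → Pre_convert_dimac operations → Spec_convert_dimac operations (convert_dimac operations)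

-- ===== LEMMAS AND PROOFS =====

theorem pvJoin2 (a b : String) : PySem.Str.join " " [a, b] = a ++ " " ++ b := by
  simp only [PySem.Str.join, PySem.Chars.join, List.intercalate]
  apply String.toList_injective
  simp [String.toList_ofList, String.toList_append]

theorem pvJoin3 (a b c : String) : PySem.Str.join " " [a, b, c] = a ++ " " ++ b ++ " " ++ c := by
  simp only [PySem.Str.join, PySem.Chars.join, List.intercalate]
  apply String.toList_injective
  simp [String.toList_ofList, String.toList_append]

-- A's three-if step appends exactly B's rendered templates for that operation.
theorem pv_step (args : List String) (p : String × List String) :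
    (let operation := p.1
     let vars_ := p.2
     let args := if operation == "and" then
        args ++ [pvIdx vars_ 1 ++ " -" ++ pvIdx vars_ 0 ++ " 0",
                 pvIdx vars_ 2 ++ " -" ++ pvIdx vars_ 0 ++ " 0",
                 "-" ++ pvIdx vars_ 1 ++ " -" ++ pvIdx vars_ 2 ++ " " ++ pvIdx vars_ 0 ++ " 0"]
      else args
     let args := if operation == "not" then
        args ++ [pvIdx vars_ 1 ++ " " ++ pvIdx vars_ 0 ++ " 0",
                 "-" ++ pvIdx vars_ 1 ++ " -" ++ pvIdx vars_ 0 ++ " 0"]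
      else args
     let args := if operation == "buffer" then
        args ++ ["-" ++ pvIdx vars_ 1 ++ " " ++ pvIdx vars_ 0 ++ " 0",
                 pvIdx vars_ 1 ++ " -" ++ pvIdx vars_ 0 ++ " 0"]
      else args
     args)
    = args ++ ((PySem.Dict.getD pvTemplates p.1 []).map (fun c => pvRender p.2 c)) := by
  obtain ⟨op, vs⟩ := p
  by_cases h1 : op = "and"
  · subst h1
    simp [pvTemplates, pvRender, PySem.Dict.getD, PySem.Dict.get?_mk_cons, List.map,
      pvJoin2, pvJoin3]
    and_intros <;> (apply String.toList_injective; simp [String.toList_append])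
  · by_cases h2 : op = "not"
    · subst h2
      simp [pvTemplates, pvRender, PySem.Dict.getD, PySem.Dict.get?_mk_cons, List.map, pvJoin2]
      apply String.toList_injective
      simp [String.toList_append]
    · by_cases h3 : op = "buffer"
      · subst h3
        simp [pvTemplates, pvRender, PySem.Dict.getD, PySem.Dict.get?_mk_cons, List.map, pvJoin2]
        apply String.toList_injective
        simp [String.toList_append]
      · simp only [pvTemplates, PySem.Dict.getD, PySem.Dict.get?_mk_cons, beq_iff_eq]
        rw [if_neg (Ne.symm h3), if_neg (Ne.symm h2), if_neg (Ne.symm h1)]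
        simp [PySem.Dict.get?, h1, h2, h3]

-- A's fold produces, after any accumulator, exactly B's recursively built list.
theorem pv_fold (operations : List (String × List String)) (acc : List String) :
    operations.foldl (fun args p =>
      let operation := p.1
      let vars_ := p.2
      let args := if operation == "and" then
          args ++ [pvIdx vars_ 1 ++ " -" ++ pvIdx vars_ 0 ++ " 0",
                   pvIdx vars_ 2 ++ " -" ++ pvIdx vars_ 0 ++ " 0",
                   "-" ++ pvIdx vars_ 1 ++ " -" ++ pvIdx vars_ 2 ++ " " ++ pvIdx vars_ 0 ++ " 0"]
        else args
      let args := if operation == "not" then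
          args ++ [pvIdx vars_ 1 ++ " " ++ pvIdx vars_ 0 ++ " 0",
                   "-" ++ pvIdx vars_ 1 ++ " -" ++ pvIdx vars_ 0 ++ " 0"]
        else args
      let args := if operation == "buffer" then
          args ++ ["-" ++ pvIdx vars_ 1 ++ " " ++ pvIdx vars_ 0 ++ " 0",
                   pvIdx vars_ 1 ++ " -" ++ pvIdx vars_ 0 ++ " 0"]
        else args
      args) acc
    = acc ++ pvGo operations := by
  induction operations generalizing acc with
  | nil => simp [pvGo]
  | cons p rest ih =>
      obtain ⟨op, vs⟩ := p
      rw [List.foldl_cons, pv_step, ih, List.append_assoc]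
      rfl

-- ===== VERDICT (by name: the statement is the Claim_ definition above) =====
theorem convert_dimac_spec : Claim_equal_convert_dimac := by
  intro operations _ _
  unfold Spec_convert_dimac convert_dimac convert_dimac_alt
  rw [pv_fold]
  simp
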